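-- pv_equiv track=rewrite | github.com/alexjust-data/backtest_SmallCaps | src/data/snapshot_inventory.py | normalize_manifest_objects
-- ===== SOURCE A (Python) =====
-- from typing import Any, Dict, Iterable, List, Optional, Tuple
--
-- def normalize_manifest_objects(objs: List[Dict[str, Any]]) -> List[Dict[str, Any]]:
--     out: List[Dict[str, Any]] = []
--     for o in objs:
--         if "key" not in o:
--             if "Key" in o:
--                 o = dict(o)
--                 o["key"] = o["Key"]
--             else:
--                 raise ValueError(f"Manifest object missing 'key': {o}")
--
--         if "size" not in o:
--             if "Size" in o:
--                 o = dict(o)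
--                 o["size"] = o["Size"]
--             elif "expected_size_bytes" in o:
--                 o = dict(o)
--                 o["size"] = o["expected_size_bytes"]
--
--         if "etag" not in o and "ETag" in o:
--             o = dict(o)
--             o["etag"] = o["ETag"]
--
--         out.append(o)
--     return out
-- ===== SOURCE B (Python) =====
-- # Single-pass scan: one traversal of each object's items collects presence flags and the
-- # first value of every alias into an accumulator; the missing canonical entries are then
-- # appended in one merge. Unchanged objects are appended by reference, as in A.
-- _MISSING = object()
--
-- def _normalized(o):
--     has_key = has_size = has_etag = False
--     a_key = a_size = a_exp = a_etag = _MISSING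
--     for k, v in o.items():
--         if k == "key":
--             has_key = True
--         elif k == "size":
--             has_size = True
--         elif k == "etag":
--             has_etag = True
--         elif k == "Key" and a_key is _MISSING:
--             a_key = v
--         elif k == "Size" and a_size is _MISSING:
--             a_size = v
--         elif k == "expected_size_bytes" and a_exp is _MISSING:
--             a_exp = v
--         elif k == "ETag" and a_etag is _MISSING:
--             a_etag = v
--     tail = []
--     if not has_key:
--         if a_key is _MISSING:
--             raise ValueError(f"Manifest object missing 'key': {o}")
--         tail.append(("key", a_key))
--     if not has_size:
--         if a_size is not _MISSING:
--             tail.append(("size", a_size))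
--         elif a_exp is not _MISSING:
--             tail.append(("size", a_exp))
--     if not has_etag and a_etag is not _MISSING:
--         tail.append(("etag", a_etag))
--     if not tail:
--         return o
--     new = dict(o)
--     new.update(tail)
--     return new
--
-- def normalize_manifest_objects(objs):
--     return [_normalized(o) for o in objs]
-- ===== Notes on version B (the rewrite author's own statement) =====
-- stated objective: alternative
-- what changed: B makes a single pass over each object's items collecting presence flags and first alias values into an accumulator, then appends the missing canonical entries in one merge, instead of A's per-key membership tests with copy-on-write rebinding.
-- outside the precondition, e.g. on normalize_manifest_objects([{'Size': '3'}]): A raises ValueError, B raises ValueError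
import Mathlib
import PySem

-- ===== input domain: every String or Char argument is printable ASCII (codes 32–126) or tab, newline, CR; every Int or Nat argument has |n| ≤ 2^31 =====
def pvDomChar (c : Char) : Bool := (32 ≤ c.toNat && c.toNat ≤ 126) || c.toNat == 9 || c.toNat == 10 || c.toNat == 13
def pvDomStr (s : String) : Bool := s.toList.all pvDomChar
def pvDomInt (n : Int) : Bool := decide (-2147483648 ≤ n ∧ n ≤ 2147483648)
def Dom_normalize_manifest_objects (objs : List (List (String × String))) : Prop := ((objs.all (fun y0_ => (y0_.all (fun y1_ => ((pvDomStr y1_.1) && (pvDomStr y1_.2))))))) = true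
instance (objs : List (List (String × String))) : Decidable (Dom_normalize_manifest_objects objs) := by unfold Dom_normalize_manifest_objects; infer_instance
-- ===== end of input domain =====

-- B replaces A's per-key membership tests and copy-on-write rebinding by ONE pass over each
-- object's items collecting presence flags and first alias values, then a single merge
-- (objective: alternative decomposition).  Equivalence is about the RETURN value; A's
-- copy-on-write aliasing of unchanged input dicts is not modelled by the List port.

-- dicts arrive as association lists: 'k in o' / 'o[k]' are first-match on the key
def pvHasKey (o : List (String × String)) (k : String) : Bool := o.any (fun p => p.1 == k)

-- Python 'o[k] = v' / dict.update step: overwrite in place if the key exists, else append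
def pvDictSet (o : List (String × String)) (k : String) (v : String) : List (String × String) :=
  if pvHasKey o k then o.map (fun p => if p.1 == k then (k, v) else p) else o ++ [(k, v)]

-- ===== PORT A =====
-- one iteration of A's loop body; on the 'raise ValueError' branch ("key"/"Key" both absent,
-- excluded by Pre_) it leaves the object unchanged
def pvStepA (o : List (String × String)) : List (String × String) :=
  let o1 := if pvHasKey o "key" then o
            else match o.lookup "Key" with
                 | some v => pvDictSet o "key" v
                 | none => o   -- raise ValueError: outside Pre_
  let o2 := if pvHasKey o1 "size" then o1
            else match o1.lookup "Size" with
                 | some v => pvDictSet o1 "size" v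
                 | none => match o1.lookup "expected_size_bytes" with
                           | some v => pvDictSet o1 "size" v
                           | none => o1
  let o3 := if !pvHasKey o2 "etag" then
              match o2.lookup "ETag" with
              | some v => pvDictSet o2 "etag" v
              | none => o2
            else o2
  o3

def normalize_manifest_objects (objs : List (List (String × String))) : List (List (String × String)) :=
  objs.foldl (fun out o => out ++ [pvStepA o]) []

-- ===== PORT B =====
-- the scan accumulator: presence flags for the canonical keys and the first value of each alias
structure PvScanSt where
  hKey : Bool
  hSize : Bool
  hEtag : Bool
  aKey : Option String
  aSize : Option String
  aExp : Option String
  aEtag : Option String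
deriving Repr, DecidableEq

-- one item of Source B's scan loop (the if/elif chain over k)
def pvScanStep (s : PvScanSt) (p : String × String) : PvScanSt :=
  if p.1 == "key" then { s with hKey := true }
  else if p.1 == "size" then { s with hSize := true }
  else if p.1 == "etag" then { s with hEtag := true }
  else if p.1 == "Key" && s.aKey.isNone then { s with aKey := some p.2 }
  else if p.1 == "Size" && s.aSize.isNone then { s with aSize := some p.2 }
  else if p.1 == "expected_size_bytes" && s.aExp.isNone then { s with aExp := some p.2 }
  else if p.1 == "ETag" && s.aEtag.isNone then { s with aEtag := some p.2 }
  else s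

-- Source B's _normalized: scan once, build tail (key, size, etag), merge once; on the raise
-- branch (no "key"/"Key": outside Pre_) the "key" entry is simply not appended
def pvStepB (o : List (String × String)) : List (String × String) :=
  let s := o.foldl pvScanStep ⟨false, false, false, none, none, none, none⟩
  let t1 : List (String × String) :=
    if !s.hKey then match s.aKey with | some v => [("key", v)] | none => [] else []
  let t2 := t1 ++ (if !s.hSize then
      match s.aSize with
      | some v => [("size", v)]
      | none => match s.aExp with | some v => [("size", v)] | none => []
    else [])
  let tail := t2 ++ (if !s.hEtag then
      match s.aEtag with | some v => [("etag", v)] | none => []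
    else [])
  if tail = [] then o
  else tail.foldl (fun acc kv => pvDictSet acc kv.1 kv.2) o  -- dict(o) + update(tail)

def normalize_manifest_objects_alt (objs : List (List (String × String))) : List (List (String × String)) :=
  objs.map pvStepB

-- ===== PRECONDITION & SPEC =====
-- Pre_ excludes exactly the inputs on which A (and B) raise ValueError:
-- some object has neither "key" nor "Key".
def Pre_normalize_manifest_objects (objs : List (List (String × String))) : Prop :=
  ∀ o ∈ objs, pvHasKey o "key" = true ∨ pvHasKey o "Key" = true
instance (objs : List (List (String × String))) : Decidable (Pre_normalize_manifest_objects objs) := by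
  unfold Pre_normalize_manifest_objects; infer_instance

def pvWitness_normalize_manifest_objects : (List (List (String × String))) :=
  [[("Key", "a.txt"), ("Size", "10")], [("key", "b.txt"), ("ETag", "e1")]]

def Spec_normalize_manifest_objects (objs : List (List (String × String))) (out : List (List (String × String))) : Prop := out = normalize_manifest_objects_alt objs
instance (objs : List (List (String × String))) (out : List (List (String × String))) : Decidable (Spec_normalize_manifest_objects objs out) := by unfold Spec_normalize_manifest_objects; infer_instance

-- ===== CLAIM (what is proved, stated in full; the proofs are below) =====
def Claim_equal_normalize_manifest_objects : Prop := ∀ (objs : List (List (String × String))), Dom_normalize_manifest_objects objs → Pre_normalize_manifest_objects objs → Spec_normalize_manifest_objects objs (normalize_manifest_objects objs)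

-- ===== LEMMAS AND PROOFS =====

theorem pvHasKey_nil (k : String) : pvHasKey [] k = false := rfl

theorem pvHasKey_cons (k0 v0 : String) (t : List (String × String)) (k : String) :
    pvHasKey ((k0, v0) :: t) k = (k0 == k || pvHasKey t k) := by
  simp [pvHasKey]

theorem pvHasKey_append (o l : List (String × String)) (k : String) :
    pvHasKey (o ++ l) k = (pvHasKey o k || pvHasKey l k) := by
  simp [pvHasKey]

theorem pvLookup_append (o l : List (String × String)) (k : String) :
    (o ++ l).lookup k = (o.lookup k).or (l.lookup k) := by
  induction o with
  | nil => simp [List.lookup]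
  | cons p t ih =>
    by_cases h : k == p.1 <;> simp [List.lookup, h, ih]

theorem pvLookup_isSome_eq_hasKey (o : List (String × String)) (k : String) :
    (o.lookup k).isSome = pvHasKey o k := by
  induction o with
  | nil => simp [pvHasKey]
  | cons p t ih =>
    rcases p with ⟨a, b⟩
    by_cases h : a = k
    · subst h; simp [List.lookup, pvHasKey]
    · have h1 : (k == a) = false := by simp [beq_eq_false_iff_ne]; exact fun e => h e.symm
      have h2 : (a == k) = false := by simp [beq_eq_false_iff_ne, h]
      simp only [List.lookup, pvHasKey, List.any_cons, h1, h2, Bool.false_or] at ih ⊢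
      exact ih

-- the scan's result in closed form: each flag is a membership test, each alias slot the
-- first-match lookup
theorem pvScan_spec (o : List (String × String)) (s : PvScanSt) :
    o.foldl pvScanStep s =
      ⟨s.hKey || pvHasKey o "key", s.hSize || pvHasKey o "size", s.hEtag || pvHasKey o "etag",
       s.aKey.or (o.lookup "Key"), s.aSize.or (o.lookup "Size"),
       s.aExp.or (o.lookup "expected_size_bytes"), s.aEtag.or (o.lookup "ETag")⟩ := by
  induction o generalizing s with
  | nil => simp [pvHasKey, List.lookup]
  | cons p t ih =>
    rcases p with ⟨k, v⟩
    by_cases h1 : k = "key" <;> by_cases h2 : k = "size" <;> by_cases h3 : k = "etag" <;>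
      by_cases h4 : k = "Key" <;> by_cases h5 : k = "Size" <;>
      by_cases h6 : k = "expected_size_bytes" <;> by_cases h7 : k = "ETag" <;>
      first
      | (exfalso; subst_vars; simp_all; done)
      | (subst_vars
         rcases s with ⟨hK, hS, hE, aK, aS, aX, aT⟩
         cases aK <;> cases aS <;> cases aX <;> cases aT <;>
           simp [List.foldl_cons, pvScanStep, ih, pvHasKey_cons, List.lookup, Option.or] <;> done)
      | (rcases s with ⟨hK, hS, hE, aK, aS, aX, aT⟩
         have e1 : (k == "key") = false := beq_eq_false_iff_ne.mpr h1
         have e2 : (k == "size") = false := beq_eq_false_iff_ne.mpr h2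
         have e3 : (k == "etag") = false := beq_eq_false_iff_ne.mpr h3
         have e4 : (k == "Key") = false := beq_eq_false_iff_ne.mpr h4
         have e5 : (k == "Size") = false := beq_eq_false_iff_ne.mpr h5
         have e6 : (k == "expected_size_bytes") = false := beq_eq_false_iff_ne.mpr h6
         have e7 : (k == "ETag") = false := beq_eq_false_iff_ne.mpr h7
         have f4 : ("Key" == k) = false := beq_eq_false_iff_ne.mpr (Ne.symm h4)
         have f5 : ("Size" == k) = false := beq_eq_false_iff_ne.mpr (Ne.symm h5)
         have f6 : ("expected_size_bytes" == k) = false := beq_eq_false_iff_ne.mpr (Ne.symm h6)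
         have f7 : ("ETag" == k) = false := beq_eq_false_iff_ne.mpr (Ne.symm h7)
         simp [List.foldl_cons, pvScanStep, ih, pvHasKey_cons, List.lookup,
               e1, e2, e3, e4, e5, e6, e7, f4, f5, f6, f7])

-- the per-object fact: A's branch chain and B's single scan + merge build the same dict
theorem pvStep_eq (o : List (String × String))
    (hpre : pvHasKey o "key" = true ∨ pvHasKey o "Key" = true) :
    pvStepA o = pvStepB o := by
  by_cases hk : pvHasKey o "key" = true <;>
  by_cases hs : pvHasKey o "size" = true <;>
  by_cases he : pvHasKey o "etag" = true <;>
  rcases hK : o.lookup "Key" with _ | vK <;>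
  rcases hS : o.lookup "Size" with _ | vS <;>
  rcases hx : o.lookup "expected_size_bytes" with _ | vx <;>
  rcases hE : o.lookup "ETag" with _ | vE <;>
  first
    | (exfalso
       have hKk := pvLookup_isSome_eq_hasKey o "Key"
       rw [hK] at hKk
       rcases hpre with h | h
       · exact hk h
       · rw [h] at hKk; exact Bool.noConfusion hKk)
    | simp [pvStepA, pvStepB, pvScan_spec, pvDictSet, List.lookup, hk, hs, he,
            hK, hS, hx, hE, pvHasKey_append, pvHasKey_cons, pvHasKey_nil, pvLookup_append]

-- ===== VERDICT (by name: the statement is the Claim_ definition above) =====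
theorem normalize_manifest_objects_spec : Claim_equal_normalize_manifest_objects := by
  intro objs _ hpre
  unfold Spec_normalize_manifest_objects normalize_manifest_objects normalize_manifest_objects_alt
  rw [PySem.List.foldl_append_singleton_eq_map]
  exact List.map_congr_left (fun o ho => pvStep_eq o (hpre o ho))
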